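-- pv_equiv track=rewrite | github.com/UINDY-INSTRUCTORS/ai-feedback-system | dot_github_folder/scripts/ai_feedback_criterion.py | get_criterion_guidance
-- ===== SOURCE A (Python) =====
-- def get_criterion_guidance(guidance: str, criterion: dict) -> str:
--     """
--     Extract relevant guidance for this specific criterion.
--
--     The guidance file has two parts:
--     - PART I: GENERAL GUIDANCE (applied to all criteria)
--     - PART II: CRITERION-SPECIFIC GUIDANCE (one section per criterion)
--
--     This function extracts:
--     - All of Part I
--     - The specific criterion section from Part II that matches this criterion's name
--
--     Returns combined guidance, or full guidance if structured format not found.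
--     """
--     criterion_name = criterion.get('name', '')
--
--     # Split guidance into lines for processing
--     lines = guidance.split('\n')
--
--     # Extract Part I (General Guidance)
--     part1_start = None
--     part1_end = None
--
--     for i, line in enumerate(lines):
--         line_stripped = line.strip().upper()
--         # Only match markdown headers (lines starting with #)
--         # Check for Part II first to avoid substring match (Part I is in Part II)
--         if line_stripped.startswith('#') and 'PART II' in line_stripped:
--             part1_end = i
--             break
--         elif line_stripped.startswith('#') and 'PART I' in line_stripped:
--             part1_start = i
--
--     # If we don't find the structured format, return the whole guidance
--     if part1_start is None and part1_end is None:
--         return guidance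
--
--     # Extract Part I text
--     if part1_start is not None and part1_end is not None:
--         general_guidance = '\n'.join(lines[part1_start:part1_end])
--     elif part1_end is not None:
--         # Part I marker not found, but Part II is - take everything before Part II
--         general_guidance = '\n'.join(lines[:part1_end])
--     else:
--         # No Part II found - return all guidance
--         return guidance
--
--     # Extract criterion-specific section from Part II
--     criterion_section = ""
--     criterion_header = f"## CRITERION: {criterion_name}"
--
--     # Find the criterion section
--     criterion_start = None
--     criterion_end = None
--
--     for i in range(part1_end, len(lines)):
--         line = lines[i].strip()
--
--         # Found the start of our criterion section
--         if line.startswith('## CRITERION:') and criterion_name in line: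
--             criterion_start = i
--
--         # Found the start of the next criterion section (end of ours)
--         elif criterion_start is not None and line.startswith('## CRITERION:'):
--             criterion_end = i
--             break
--
--         # Found the end of Part II (could be a major section marker)
--         elif criterion_start is not None and line.startswith('# ') and 'CRITERION' not in line:
--             criterion_end = i
--             break
--
--     # Extract criterion-specific guidance
--     if criterion_start is not None:
--         if criterion_end is not None:
--             criterion_section = '\n'.join(lines[criterion_start:criterion_end])
--         else:
--             # This is the last criterion section, take until end of file
--             criterion_section = '\n'.join(lines[criterion_start:])
--
--     # Combine general + specific guidance
--     if criterion_section:
--         combined = general_guidance + '\n\n---\n\n' + criterion_section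
--         return combined
--     else:
--         # No specific section found for this criterion, just return general guidance
--         # (Better than returning nothing - at least we have general context)
--         return general_guidance
-- ===== SOURCE B (Python) =====
-- def get_criterion_guidance(guidance: str, criterion: dict) -> str:
--     """Single classification pass over the lines, then pure selection over the records."""
--     name = criterion.get('name', '')
--     lines = guidance.split('\n')
--
--     # One pass: classify every line into a header record.
--     recs = []
--     for i, raw in enumerate(lines):
--         s = raw.strip()
--         u = s.upper()
--         crit = s.startswith('## CRITERION:')
--         recs.append((i,
--                      u.startswith('#') and 'PART II' in u,   # Part II header
--                      u.startswith('#') and 'PART I' in u,    # Part I header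
--                      crit and name in s,                     # matching criterion header
--                      crit,                                   # any criterion header
--                      s.startswith('# ') and 'CRITERION' not in s))  # major section marker
--
--     part1_end = next((r[0] for r in recs if r[1]), None)
--     if part1_end is None:
--         return guidance
--     part1_start = next((r[0] for r in reversed(recs[:part1_end]) if r[2]), None)
--     if part1_start is not None:
--         general = '\n'.join(lines[part1_start:part1_end])
--     else:
--         general = '\n'.join(lines[:part1_end])
--
--     tail = recs[part1_end:]
--     s0 = next((r[0] for r in tail if r[3]), None)
--     if s0 is None:
--         return general
--     c_end = next((r[0] for r in tail
--                   if r[0] > s0 and ((r[4] and not r[3]) or r[5])), None)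
--     region = tail if c_end is None else [r for r in tail if r[0] < c_end]
--     c_start = next((r[0] for r in reversed(region) if r[3]), s0)
--     if c_end is not None:
--         section = '\n'.join(lines[c_start:c_end])
--     else:
--         section = '\n'.join(lines[c_start:])
--     if section:
--         return general + '\n\n---\n\n' + section
--     return general
-- ===== Notes on version B (the rewrite author's own statement) =====
-- stated objective: alternative
-- what changed: Replaces A's two stateful break-driven scan loops by a single classification pass that builds one header-record table per line, from which Part-I bounds and the criterion section are then derived by pure find/filter selection over the records.
import Mathlib
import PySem

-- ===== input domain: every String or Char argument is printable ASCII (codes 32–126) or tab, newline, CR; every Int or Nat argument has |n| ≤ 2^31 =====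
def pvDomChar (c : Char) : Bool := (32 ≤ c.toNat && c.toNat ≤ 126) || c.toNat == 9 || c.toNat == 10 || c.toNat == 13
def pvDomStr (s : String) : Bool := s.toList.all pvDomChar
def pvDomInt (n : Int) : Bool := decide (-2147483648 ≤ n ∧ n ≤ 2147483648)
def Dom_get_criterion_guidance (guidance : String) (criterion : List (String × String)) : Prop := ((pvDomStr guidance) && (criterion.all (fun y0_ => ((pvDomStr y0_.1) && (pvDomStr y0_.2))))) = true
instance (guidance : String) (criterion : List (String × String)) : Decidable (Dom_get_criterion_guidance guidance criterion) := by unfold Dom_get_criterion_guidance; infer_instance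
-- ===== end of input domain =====

-- B replaces A's two stateful break-loops by one classification pass over the lines plus
-- pure find/filter selection over the resulting header records (objective: alternative).

-- ===== PORT A =====

-- first loop of A: 'for i, line in enumerate(lines)' with break at the first PART II header
def pvA_loop1 : List (Int × String) → Option Int → Option Int × Option Int
  | [], part1_start => (part1_start, none)
  | (i, line) :: rest, part1_start =>
    let line_stripped := PySem.Str.upper (PySem.Str.strip line)
    if PySem.Str.startswith line_stripped "#" && PySem.Str.isIn "PART II" line_stripped then
      (part1_start, some i)
    else if PySem.Str.startswith line_stripped "#" && PySem.Str.isIn "PART I" line_stripped then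
      pvA_loop1 rest (some i)
    else
      pvA_loop1 rest part1_start

-- second loop of A: 'for i in range(part1_end, len(lines))' with breaks
def pvA_loop2 (criterion_name : String) (lines : List String) : List Int → Option Int → Option Int × Option Int
  | [], criterion_start => (criterion_start, none)
  | i :: rest, criterion_start =>
    let line := PySem.Str.strip (PySem.List.pyGetD lines i "")
    if PySem.Str.startswith line "## CRITERION:" && PySem.Str.isIn criterion_name line then
      pvA_loop2 criterion_name lines rest (some i)
    else if criterion_start.isSome && PySem.Str.startswith line "## CRITERION:" then
      (criterion_start, some i)
    else if criterion_start.isSome && (PySem.Str.startswith line "# " && !(PySem.Str.isIn "CRITERION" line)) then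
      (criterion_start, some i)
    else
      pvA_loop2 criterion_name lines rest criterion_start

-- tail of A after 'general_guidance' is fixed (criterion section extraction + combination)
def pvA_rest (criterion_name : String) (lines : List String) (general_guidance : String) (part1_end : Int) : String :=
  match pvA_loop2 criterion_name lines (PySem.List.pyRange part1_end (lines.length : Int) 1) none with
  | (some criterion_start, criterion_end) =>
    let criterion_section :=
      match criterion_end with
      | some ce => PySem.Str.join "\n" (PySem.List.slice lines (some criterion_start) (some ce))
      | none => PySem.Str.join "\n" (PySem.List.slice lines (some criterion_start) none)
    if criterion_section = "" then general_guidance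
    else general_guidance ++ "\n\n---\n\n" ++ criterion_section
  | (none, _) => general_guidance

def get_criterion_guidance (guidance : String) (criterion : List (String × String)) : String :=
  let criterion_name := PySem.Dict.getD (PySem.Dict.mk criterion) "name" ""
  let lines := (PySem.Str.split? guidance "\n").getD []
  match pvA_loop1 (PySem.List.enumerate lines 0) none with
  | (part1_start, part1_end) =>
    if part1_start = none ∧ part1_end = none then guidance
    else
      match part1_start, part1_end with
      | some a, some b =>
        pvA_rest criterion_name lines (PySem.Str.join "\n" (PySem.List.slice lines (some a) (some b))) b
      | none, some b =>
        pvA_rest criterion_name lines (PySem.Str.join "\n" (PySem.List.slice lines none (some b))) b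
      | _, none => guidance

-- ===== PORT B =====

abbrev pvRec := Int × Bool × Bool × Bool × Bool × Bool

-- B's classification of one enumerated line into a header record
def pvMk (name : String) (p : Int × String) : pvRec :=
  let s := PySem.Str.strip p.2
  let u := PySem.Str.upper s
  let crit := PySem.Str.startswith s "## CRITERION:"
  (p.1,
   PySem.Str.startswith u "#" && PySem.Str.isIn "PART II" u,
   PySem.Str.startswith u "#" && PySem.Str.isIn "PART I" u,
   crit && PySem.Str.isIn name s,
   crit,
   PySem.Str.startswith s "# " && !(PySem.Str.isIn "CRITERION" s))

def get_criterion_guidance_alt (guidance : String) (criterion : List (String × String)) : String :=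
  let name := PySem.Dict.getD (PySem.Dict.mk criterion) "name" ""
  let lines := (PySem.Str.split? guidance "\n").getD []
  let recs := (PySem.List.enumerate lines 0).foldl (fun acc p => acc ++ [pvMk name p]) ([] : List pvRec)
  match ((recs.find? (fun r => r.2.1)).map (fun r => r.1)) with
  | none => guidance
  | some part1_end =>
    let part1_start := ((PySem.List.slice recs none (some part1_end)).reverse.find? (fun r => r.2.2.1)).map (fun r => r.1)
    let general :=
      match part1_start with
      | some a => PySem.Str.join "\n" (PySem.List.slice lines (some a) (some part1_end))
      | none => PySem.Str.join "\n" (PySem.List.slice lines none (some part1_end))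
    let tail := PySem.List.slice recs (some part1_end) none
    match ((tail.find? (fun r => r.2.2.2.1)).map (fun r => r.1)) with
    | none => general
    | some s0 =>
      let c_end := (tail.find? (fun r => decide (s0 < r.1) && ((r.2.2.2.2.1 && !r.2.2.2.1) || r.2.2.2.2.2))).map (fun r => r.1)
      let region := match c_end with
        | none => tail
        | some ce => tail.filter (fun r => decide (r.1 < ce))
      let c_start := ((region.reverse.find? (fun r => r.2.2.2.1)).map (fun r => r.1)).getD s0
      let sec :=
        match c_end with
        | some ce => PySem.Str.join "\n" (PySem.List.slice lines (some c_start) (some ce))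
        | none => PySem.Str.join "\n" (PySem.List.slice lines (some c_start) none)
      if sec = "" then general
      else general ++ "\n\n---\n\n" ++ sec

-- ===== PRECONDITION & SPEC =====
def Spec_get_criterion_guidance (guidance : String) (criterion : List (String × String)) (out : String) : Prop := out = get_criterion_guidance_alt guidance criterion
instance (guidance : String) (criterion : List (String × String)) (out : String) : Decidable (Spec_get_criterion_guidance guidance criterion out) := by unfold Spec_get_criterion_guidance; infer_instance

-- ===== CLAIM (what is proved, stated in full; the proofs are below) =====
def Claim_equal_get_criterion_guidance : Prop := ∀ (guidance : String) (criterion : List (String × String)), Dom_get_criterion_guidance guidance criterion → Spec_get_criterion_guidance guidance criterion (get_criterion_guidance guidance criterion)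

-- ===== LEMMAS AND PROOFS =====

-- every index in an enumeration starting at s is ≥ s
theorem pv_fst_lb {nm : String} {xs : List String} {s : Int} {r : pvRec}
    (h : r ∈ (PySem.List.enumerate xs s).map (pvMk nm)) : s ≤ r.1 := by
  rcases List.mem_map.1 h with ⟨p, hp, rfl⟩
  rcases (PySem.List.mem_enumerate_iff _ _ _).1 hp with ⟨k, hk, hpe⟩
  subst hpe; simp [pvMk]

-- find? respects pointwise-equal predicates on members
theorem pv_find?_congr {α : Type} {l : List α} {p q : α → Bool}
    (h : ∀ x ∈ l, p x = q x) : l.find? p = l.find? q := by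
  induction l with
  | nil => rfl
  | cons x t ih =>
    simp only [List.find?, h x (by simp)]
    split <;> simp_all

-- a stripped line starting with '## CRITERION:' contains 'CRITERION'
theorem pv_crit_isIn {s : String} (h : PySem.Str.startswith s "## CRITERION:" = true) :
    PySem.Str.isIn "CRITERION" s = true := by
  simp only [PySem.Str.startswith_eq, PySem.Chars.startswith_iff] at h
  simp only [PySem.Str.isIn_eq, PySem.Chars.isIn_iff_infix]
  exact List.IsInfix.trans (by decide) h.isInfix

-- characterisation of A's first loop
theorem pv_loop1_char (nm : String) : ∀ (xs : List String) (s : Int) (acc : Option Int),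
    pvA_loop1 (PySem.List.enumerate xs s) acc =
      ((((((PySem.List.enumerate xs s).map (pvMk nm)).takeWhile (fun r => !r.2.1)).reverse.find?
          (fun r => r.2.2.1)).map (fun r => r.1)).or acc,
       ((((PySem.List.enumerate xs s).map (pvMk nm)).find? (fun r => r.2.1)).map (fun r => r.1))) := by
  intro xs
  induction xs with
  | nil =>
    intro s acc
    simp only [PySem.List.enumerate_nil, List.map_nil, List.takeWhile_nil,
      List.reverse_nil, List.find?_nil, Option.map_none, Option.none_or, pvA_loop1]
  | cons x t ih =>
    intro s acc
    rw [PySem.List.enumerate_cons, List.map_cons, List.takeWhile_cons]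
    conv_lhs => rw [pvA_loop1]
    by_cases h2 : (PySem.Str.startswith (PySem.Str.upper (PySem.Str.strip x)) "#" &&
        PySem.Str.isIn "PART II" (PySem.Str.upper (PySem.Str.strip x))) = true
    · have hb : (pvMk nm (s, x)).2.1 = true := by dsimp only [pvMk]; exact h2
      rw [if_pos h2, List.find?_cons_of_pos (p := fun (r : pvRec) => r.2.1) hb, hb]
      simp only [Bool.not_true, Bool.false_eq_true, if_false, List.reverse_nil,
        List.find?_nil, Option.map_none, Option.none_or, Option.map_some]
      dsimp only [pvMk]
    · have hb : (pvMk nm (s, x)).2.1 = false := by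
        dsimp only [pvMk]; simpa using h2
      rw [if_neg h2, List.find?_cons_of_neg (p := fun (r : pvRec) => r.2.1) (by simp [hb]), hb]
      simp only [Bool.not_false, if_true, List.reverse_cons, List.find?_append]
      by_cases h1 : (PySem.Str.startswith (PySem.Str.upper (PySem.Str.strip x)) "#" &&
          PySem.Str.isIn "PART I" (PySem.Str.upper (PySem.Str.strip x))) = true
      · have hb1 : (pvMk nm (s, x)).2.2.1 = true := by dsimp only [pvMk]; exact h1
        rw [if_pos h1, ih, List.find?_cons_of_pos (p := fun (r : pvRec) => r.2.2.1) hb1]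
        simp only [Option.map_or, Option.or_assoc, Option.map_some, Option.some_or]
        dsimp only [pvMk]
      · have hb1 : (pvMk nm (s, x)).2.2.1 = false := by
          dsimp only [pvMk]; simpa using h1
        rw [if_neg h1, ih, List.find?_cons_of_neg (p := fun (r : pvRec) => r.2.2.1) (by simp [hb1])]
        simp only [List.find?_nil, Option.or_none]

-- take up to the index of the first hit = takeWhile of the negation
theorem pv_mk_fst (nm : String) (p : Int × String) : (pvMk nm p).1 = p.1 := by
  dsimp only [pvMk]

theorem pv_find_take (nm : String) (p : pvRec → Bool) : ∀ (xs : List String) (s : Int) (r : pvRec),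
    ((PySem.List.enumerate xs s).map (pvMk nm)).find? p = some r →
    ((PySem.List.enumerate xs s).map (pvMk nm)).take (r.1 - s).toNat =
      ((PySem.List.enumerate xs s).map (pvMk nm)).takeWhile (fun x => !p x) := by
  intro xs
  induction xs with
  | nil => intro s r h; simp [PySem.List.enumerate_nil] at h
  | cons x t ih =>
    intro s r h
    rw [PySem.List.enumerate_cons, List.map_cons] at h ⊢
    rw [List.takeWhile_cons]
    cases hp : p (pvMk nm (s, x)) with
    | true =>
      rw [List.find?_cons_of_pos hp] at h
      cases h
      have h0 : ((pvMk nm (s, x)).1 - s).toNat = 0 := by rw [pv_mk_fst]; omega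
      simp [h0]
    | false =>
      rw [List.find?_cons_of_neg (by simp [hp])] at h
      have hr : (s + 1) ≤ r.1 := pv_fst_lb (List.mem_of_find?_eq_some h)
      have h1 : (r.1 - s).toNat = (r.1 - (s + 1)).toNat + 1 := by omega
      rw [h1, List.take_succ_cons]
      simp only [Bool.not_false, if_true]
      rw [ih _ _ h]

-- filter below the index of the first hit = takeWhile of the negation
theorem pv_find_filter (nm : String) (p : pvRec → Bool) : ∀ (xs : List String) (s : Int) (r : pvRec),
    ((PySem.List.enumerate xs s).map (pvMk nm)).find? p = some r →
    ((PySem.List.enumerate xs s).map (pvMk nm)).filter (fun x => decide (x.1 < r.1)) =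
      ((PySem.List.enumerate xs s).map (pvMk nm)).takeWhile (fun x => !p x) := by
  intro xs
  induction xs with
  | nil => intro s r h; simp [PySem.List.enumerate_nil] at h
  | cons x t ih =>
    intro s r h
    rw [PySem.List.enumerate_cons, List.map_cons] at h ⊢
    rw [List.takeWhile_cons, List.filter_cons]
    cases hp : p (pvMk nm (s, x)) with
    | true =>
      rw [List.find?_cons_of_pos hp] at h
      cases h
      have h0 : decide ((pvMk nm (s, x)).1 < (pvMk nm (s, x)).1) = false := by simp
      rw [h0]
      simp only [Bool.false_eq_true, if_false, Bool.not_true]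
      rw [List.filter_eq_nil_iff.2]
      intro a ha
      have := pv_fst_lb (nm := nm) ha
      simp only [decide_eq_true_eq]
      rw [pv_mk_fst]
      omega
    | false =>
      rw [List.find?_cons_of_neg (by simp [hp])] at h
      have hr : (s + 1) ≤ r.1 := pv_fst_lb (List.mem_of_find?_eq_some h)
      have h0 : decide ((pvMk nm (s, x)).1 < r.1) = true := by
        rw [pv_mk_fst]; simpa using by omega
      rw [h0]
      simp only [if_true, Bool.not_false]
      rw [ih _ _ h]

-- dropping k elements of an enumeration
theorem pv_enum_drop : ∀ (xs : List String) (k : Nat) (s : Int),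
    (PySem.List.enumerate xs s).drop k = PySem.List.enumerate (xs.drop k) (s + k) := by
  intro xs
  induction xs with
  | nil => intro k s; simp [PySem.List.enumerate_nil]
  | cons x t ih =>
    intro k s
    cases k with
    | zero => simp
    | succ n =>
      rw [PySem.List.enumerate_cons]
      simp only [List.drop_succ_cons]
      rw [ih n (s + 1)]
      congr 1
      push_cast
      ring

-- proof-side row loop: A's second loop expressed over (index, line) rows
def pvRowLoop2 (nm : String) : List (Int × String) → Option Int → Option Int × Option Int
  | [], cs => (cs, none)
  | (i, raw) :: rest, cs =>
    let line := PySem.Str.strip raw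
    if PySem.Str.startswith line "## CRITERION:" && PySem.Str.isIn nm line then
      pvRowLoop2 nm rest (some i)
    else if cs.isSome && PySem.Str.startswith line "## CRITERION:" then
      (cs, some i)
    else if cs.isSome && (PySem.Str.startswith line "# " && !(PySem.Str.isIn "CRITERION" line)) then
      (cs, some i)
    else
      pvRowLoop2 nm rest cs

-- bridge: A's index loop over range(k, len) is the row loop over the enumerated suffix
theorem pv_loop2_bridge (nm : String) : ∀ (m : Nat) (lines : List String) (k : Nat) (cs : Option Int),
    lines.length - k = m →
    pvA_loop2 nm lines (PySem.List.pyRange (k : Int) (lines.length : Int) 1) cs =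
      pvRowLoop2 nm (PySem.List.enumerate (lines.drop k) (k : Int)) cs := by
  intro m
  induction m with
  | zero =>
    intro lines k cs hm
    have hk : lines.length ≤ k := by omega
    have h1 : PySem.List.pyRange (k : Int) (lines.length : Int) 1 = [] := by
      simp [PySem.List.pyRange]; omega
    have h2 : lines.drop k = [] := List.drop_eq_nil_of_le hk
    rw [h1, h2, PySem.List.enumerate_nil]
    rfl
  | succ n ih =>
    intro lines k cs hm
    have hk : k < lines.length := by omega
    have h1 : PySem.List.pyRange (k : Int) (lines.length : Int) 1 =
        (k : Int) :: PySem.List.pyRange ((k : Int) + 1) (lines.length : Int) 1 := by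
      exact PySem.List.pyRange_one_cons (by exact_mod_cast hk)
    have h2 : lines.drop k = lines[k] :: lines.drop (k + 1) := List.drop_eq_getElem_cons hk
    have h3 : PySem.List.pyGetD lines (k : Int) "" = lines[k] := by
      rw [PySem.List.pyGetD_natCast]
      exact List.getD_eq_getElem lines "" hk
    rw [h1, h2, PySem.List.enumerate_cons]
    conv_lhs => rw [pvA_loop2]
    conv_rhs => rw [pvRowLoop2]
    rw [h3]
    have hc : ((k : Int) + 1) = (((k + 1 : Nat)) : Int) := by push_cast; ring
    have ihx := fun cs' => ih lines (k + 1) cs' (by omega)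
    rw [hc]
    split
    · exact ihx _
    · split
      · rfl
      · split
        · rfl
        · exact ihx _

-- B's break predicate
def pvEnd (r : pvRec) : Bool := (r.2.2.2.2.1 && !r.2.2.2.1) || r.2.2.2.2.2

def pvMf (r : pvRec) : Bool := r.2.2.2.1

-- phase 2 of the second loop (a criterion start has been seen)
theorem pv_loop2_phase2 (nm : String) : ∀ (xs : List String) (s j : Int),
    pvRowLoop2 nm (PySem.List.enumerate xs s) (some j) =
      (match ((PySem.List.enumerate xs s).map (pvMk nm)).find? pvEnd with
       | none => (((((PySem.List.enumerate xs s).map (pvMk nm)).reverse.find? pvMf).map (fun r => r.1)).or (some j), none)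
       | some e => ((((((PySem.List.enumerate xs s).map (pvMk nm)).takeWhile (fun r => !pvEnd r)).reverse.find? pvMf).map (fun r => r.1)).or (some j), some e.1)) := by
  intro xs
  induction xs with
  | nil =>
    intro s j
    simp only [PySem.List.enumerate_nil, List.map_nil, List.find?_nil, List.reverse_nil,
      Option.map_none, Option.none_or]
    rfl
  | cons x t ih =>
    intro s j
    rw [PySem.List.enumerate_cons, List.map_cons]
    conv_lhs => rw [pvRowLoop2]
    simp only [Option.isSome_some, Bool.true_and]
    by_cases hM : (PySem.Str.startswith (PySem.Str.strip x) "## CRITERION:" &&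
        PySem.Str.isIn nm (PySem.Str.strip x)) = true
    · have hC : PySem.Str.startswith (PySem.Str.strip x) "## CRITERION:" = true :=
        ((Bool.and_eq_true _ _ ▸ hM).1)
      have hbE : pvEnd (pvMk nm (s, x)) = false := by
        dsimp only [pvEnd, pvMk]
        rw [hM, pv_crit_isIn hC]
        simp
      have hbM : pvMf (pvMk nm (s, x)) = true := by dsimp only [pvMf, pvMk]; exact hM
      rw [if_pos hM, ih (s + 1) s]
      rw [List.find?_cons_of_neg (p := pvEnd) (by simp [hbE]), List.takeWhile_cons, hbE]
      simp only [Bool.not_false, if_true, List.reverse_cons, List.find?_append]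
      cases hF : (List.map (pvMk nm) (PySem.List.enumerate t (s + 1))).find? pvEnd with
      | none =>
        dsimp only []
        rw [List.find?_cons_of_pos (p := pvMf) hbM]
        simp only [Option.map_or, Option.or_assoc, Option.map_some, Option.some_or, pv_mk_fst]
      | some e =>
        dsimp only []
        rw [List.find?_cons_of_pos (p := pvMf) hbM]
        simp only [Option.map_or, Option.or_assoc, Option.map_some, Option.some_or, pv_mk_fst]
    · have hbM : pvMf (pvMk nm (s, x)) = false := by
        dsimp only [pvMf, pvMk]; simpa using hM
      have hMf : (PySem.Str.startswith (PySem.Str.strip x) "## CRITERION:" &&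
          PySem.Str.isIn nm (PySem.Str.strip x)) = false := by simpa using hM
      rw [if_neg hM]
      by_cases hC : PySem.Str.startswith (PySem.Str.strip x) "## CRITERION:" = true
      · have hbE : pvEnd (pvMk nm (s, x)) = true := by
          dsimp only [pvEnd, pvMk]
          rw [hMf, hC]
          simp
        rw [if_pos hC]
        rw [List.find?_cons_of_pos (p := pvEnd) hbE, List.takeWhile_cons, hbE]
        simp only [Bool.not_true, Bool.false_eq_true, if_false, List.reverse_nil, List.find?_nil,
          Option.map_none, Option.none_or, pv_mk_fst]
      · by_cases hMaj : (PySem.Str.startswith (PySem.Str.strip x) "# " &&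
            !PySem.Str.isIn "CRITERION" (PySem.Str.strip x)) = true
        · have hbE : pvEnd (pvMk nm (s, x)) = true := by
            dsimp only [pvEnd, pvMk]; rw [hMaj]; simp
          rw [if_neg hC, if_pos hMaj]
          rw [List.find?_cons_of_pos (p := pvEnd) hbE, List.takeWhile_cons, hbE]
          simp only [Bool.not_true, Bool.false_eq_true, if_false, List.reverse_nil, List.find?_nil,
            Option.map_none, Option.none_or, pv_mk_fst]
        · have hbE : pvEnd (pvMk nm (s, x)) = false := by
            dsimp only [pvEnd, pvMk]
            simp only [Bool.not_eq_true] at hC hMaj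
            rw [hMf, hC, hMaj]
            simp
          rw [if_neg hC, if_neg hMaj, ih (s + 1) j]
          rw [List.find?_cons_of_neg (p := pvEnd) (by simp [hbE]), List.takeWhile_cons, hbE]
          simp only [Bool.not_false, if_true, List.reverse_cons, List.find?_append]
          cases hF : (List.map (pvMk nm) (PySem.List.enumerate t (s + 1))).find? pvEnd with
          | none =>
            dsimp only []
            rw [List.find?_cons_of_neg (p := pvMf) (by simp [hbM]), List.find?_nil]
            simp only [Option.or_none]
          | some e =>
            dsimp only []
            rw [List.find?_cons_of_neg (p := pvMf) (by simp [hbM]), List.find?_nil]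
            simp only [Option.or_none]

-- B's selection over the records of the Part II suffix
def pvSecondSpec (tr : List pvRec) : Option Int × Option Int :=
  match (tr.find? pvMf).map (fun r => r.1) with
  | none => (none, none)
  | some s0 =>
    let ce := (tr.find? (fun r => decide (s0 < r.1) && pvEnd r)).map (fun r => r.1)
    let region := match ce with
      | none => tr
      | some c => tr.filter (fun r => decide (r.1 < c))
    (some ((((region.reverse.find? pvMf).map (fun r => r.1))).getD s0), ce)

-- full characterisation of the second loop
theorem pv_loop2_char (nm : String) : ∀ (xs : List String) (s : Int),
    pvRowLoop2 nm (PySem.List.enumerate xs s) none =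
      pvSecondSpec ((PySem.List.enumerate xs s).map (pvMk nm)) := by
  intro xs
  induction xs with
  | nil => intro s; rfl
  | cons x t ih =>
    intro s
    rw [PySem.List.enumerate_cons, List.map_cons]
    conv_lhs => rw [pvRowLoop2]
    simp only [Option.isSome_none, Bool.false_and, Bool.false_eq_true, if_false]
    by_cases hM : (PySem.Str.startswith (PySem.Str.strip x) "## CRITERION:" &&
        PySem.Str.isIn nm (PySem.Str.strip x)) = true
    · have hbM : pvMf (pvMk nm (s, x)) = true := by dsimp only [pvMf, pvMk]; exact hM
      rw [if_pos hM, pv_loop2_phase2 nm t (s + 1) s]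
      dsimp only [pvSecondSpec]
      rw [List.find?_cons_of_pos (p := pvMf) hbM]
      simp only [Option.map_some, pv_mk_fst]
      have hskip : decide ((s : Int) < (pvMk nm (s, x)).1) = false := by
        rw [pv_mk_fst]; simp
      rw [List.find?_cons_of_neg (p := fun r => decide ((s : Int) < r.1) && pvEnd r)
        (by simp [hskip])]
      have hcongr : (List.map (pvMk nm) (PySem.List.enumerate t (s + 1))).find?
            (fun r => decide ((s : Int) < r.1) && pvEnd r) =
          (List.map (pvMk nm) (PySem.List.enumerate t (s + 1))).find? pvEnd :=
        pv_find?_congr (fun r hr => by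
          have := pv_fst_lb (nm := nm) hr
          have hd : decide ((s : Int) < r.1) = true := by simpa using by omega
          simp only [hd, Bool.true_and])
      rw [hcongr]
      cases hFE : (List.map (pvMk nm) (PySem.List.enumerate t (s + 1))).find? pvEnd with
      | none =>
        simp only [Option.map_none, List.reverse_cons, List.find?_append]
        rw [List.find?_cons_of_pos (p := pvMf) hbM]
        cases hX : (List.map (pvMk nm) (PySem.List.enumerate t (s + 1))).reverse.find? pvMf with
        | none => simp [pv_mk_fst]
        | some a => simp
      | some e =>
        have he : (s + 1) ≤ e.1 := pv_fst_lb (List.mem_of_find?_eq_some hFE)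
        simp only [Option.map_some]
        have hkeep : decide ((pvMk nm (s, x)).1 < e.1) = true := by
          rw [pv_mk_fst]; simpa using by omega
        rw [List.filter_cons]
        rw [hkeep]
        simp only [if_true]
        rw [pv_find_filter nm pvEnd t (s + 1) e hFE]
        simp only [List.reverse_cons, List.find?_append]
        rw [List.find?_cons_of_pos (p := pvMf) hbM]
        cases hX : ((List.map (pvMk nm) (PySem.List.enumerate t (s + 1))).takeWhile
            (fun x => !pvEnd x)).reverse.find? pvMf with
        | none => simp [pv_mk_fst]
        | some a => simp
    · have hbM : pvMf (pvMk nm (s, x)) = false := by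
        dsimp only [pvMf, pvMk]; simpa using hM
      rw [if_neg hM, ih (s + 1)]
      dsimp only [pvSecondSpec]
      rw [List.find?_cons_of_neg (p := pvMf) (by simp [hbM])]
      cases hFM : (List.map (pvMk nm) (PySem.List.enumerate t (s + 1))).find? pvMf with
      | none => simp
      | some m =>
        have hm : (s + 1) ≤ m.1 := pv_fst_lb (List.mem_of_find?_eq_some hFM)
        simp only [Option.map_some]
        have hskip : decide (m.1 < (pvMk nm (s, x)).1) = false := by
          rw [pv_mk_fst]; simp only [decide_eq_false_iff_not]; omega
        rw [List.find?_cons_of_neg (p := fun r => decide (m.1 < r.1) && pvEnd r) (by simp [hskip])]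
        cases hFE : (List.map (pvMk nm) (PySem.List.enumerate t (s + 1))).find?
            (fun r => decide (m.1 < r.1) && pvEnd r) with
        | none =>
          simp only [Option.map_none, List.reverse_cons, List.find?_append]
          rw [List.find?_cons_of_neg (p := pvMf) (by simp [hbM]), List.find?_nil]
          simp
        | some e =>
          have he : (s + 1) ≤ e.1 := pv_fst_lb (List.mem_of_find?_eq_some hFE)
          simp only [Option.map_some]
          rw [List.filter_cons]
          have hkeep : decide ((pvMk nm (s, x)).1 < e.1) = true := by
            rw [pv_mk_fst]; simp only [decide_eq_true_eq]; omega
          rw [hkeep]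
          simp only [if_true, List.reverse_cons, List.find?_append]
          rw [List.find?_cons_of_neg (p := pvMf) (by simp [hbM]), List.find?_nil]
          simp

-- ===== VERDICT (by name: the statement is the Claim_ definition above) =====
theorem get_criterion_guidance_spec : Claim_equal_get_criterion_guidance := by
  intro guidance criterion _dom
  unfold Spec_get_criterion_guidance
  unfold get_criterion_guidance get_criterion_guidance_alt
  dsimp only []
  rw [pv_loop1_char (PySem.Dict.getD (PySem.Dict.mk criterion) "name" "")
    ((PySem.Str.split? guidance "\n").getD []) 0 none]
  rw [PySem.List.foldl_append_singleton_eq_map, List.nil_append]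
  set nm := PySem.Dict.getD (PySem.Dict.mk criterion) "name" "" with hnm
  set L := (PySem.Str.split? guidance "\n").getD [] with hL
  set F := List.map (pvMk nm) (PySem.List.enumerate L 0) with hF
  dsimp only []
  simp only [Option.or_none]
  cases hE : List.find? (fun (r : pvRec) => r.2.1) F with
  | none =>
    simp only [Option.map_none]
    cases hX : List.find? (fun (r : pvRec) => r.2.2.1) (List.takeWhile (fun (r : pvRec) => !r.2.1) F).reverse with
    | none => simp
    | some a => simp
  | some r =>
    obtain ⟨p, hpmem, hpr⟩ := List.mem_map.1 (List.mem_of_find?_eq_some hE)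
    obtain ⟨k, hk, hpe⟩ := (PySem.List.mem_enumerate_iff _ _ _).1 hpmem
    have hr1 : r.1 = (k : Int) := by rw [← hpr, hpe, pv_mk_fst]; simp
    have htake : F.take k = F.takeWhile (fun (r : pvRec) => !r.2.1) := by
      have h := pv_find_take nm (fun (r : pvRec) => r.2.1) L 0 r hE
      rw [hr1] at h
      simpa using h
    set T := List.map (pvMk nm) (PySem.List.enumerate (L.drop k) (k : Int)) with hT
    have hdrop : F.drop k = T := by
      rw [hF, ← List.map_drop, pv_enum_drop]
      norm_num
      rw [hT]
    simp only [Option.map_some]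
    rw [if_neg (by simp)]
    rw [show (fun (r : pvRec) => r.2.2.2.1) = pvMf from rfl]
    simp only [show ∀ s0 : Int, (fun (r : pvRec) => decide (s0 < r.1) &&
        ((r.2.2.2.2.1 && !r.2.2.2.1) || r.2.2.2.2.2)) =
        (fun r => decide (s0 < r.1) && pvEnd r) from fun _ => rfl]
    rw [hr1]
    rw [PySem.List.slice_to_natCast, PySem.List.slice_from_natCast]
    rw [htake, hdrop]
    cases hX : List.find? (fun (r : pvRec) => r.2.2.1) (List.takeWhile (fun (r : pvRec) => !r.2.1) F).reverse with
    | none =>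
      simp only [Option.map_none]
      unfold pvA_rest
      rw [pv_loop2_bridge nm (L.length - k) L k none rfl,
          pv_loop2_char nm (L.drop k) (k : Int), ← hT]
      dsimp only [pvSecondSpec]
      cases hS : List.find? pvMf T with
      | none =>
        simp only [Option.map_none]
      | some m =>
        simp only [Option.map_some]
    | some a =>
      simp only [Option.map_some]
      unfold pvA_rest
      rw [pv_loop2_bridge nm (L.length - k) L k none rfl,
          pv_loop2_char nm (L.drop k) (k : Int), ← hT]
      dsimp only [pvSecondSpec]
      cases hS : List.find? pvMf T with
      | none =>
        simp only [Option.map_none]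
      | some m =>
        simp only [Option.map_some]
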